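-- pv_equiv track=rewrite | github.com/ccBitTorrent/ccbt | ccbt/interface/data_provider.py | _build_availability_histogram
-- ===== SOURCE A (Python) =====
-- def _build_availability_histogram(availability: list[int]) -> dict[str, int]:
--     """Create simple histogram buckets describing piece availability."""
--     histogram = {
--         "missing": 0,
--         "rare": 0,
--         "common": 0,
--         "abundant": 0,
--     }
--     for count in availability:
--         if count <= 0:
--             histogram["missing"] += 1
--         elif count == 1:
--             histogram["rare"] += 1
--         elif count <= 3:
--             histogram["common"] += 1
--         else:
--             histogram["abundant"] += 1
--     return histogram
-- ===== SOURCE B (Python) =====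
-- def _build_availability_histogram(availability: list[int]) -> dict[str, int]:
--     """Create simple histogram buckets describing piece availability."""
--     return {
--         "missing": sum(1 for c in availability if c <= 0),
--         "rare": sum(1 for c in availability if c == 1),
--         "common": sum(1 for c in availability if 2 <= c <= 3),
--         "abundant": sum(1 for c in availability if c >= 4),
--     }
-- ===== Notes on version B (the rewrite author's own statement) =====
-- stated objective: alternative
-- what changed: Replaces the single loop with a mutated four-key dict and a threshold cascade by four independent counting passes over the list, one disjoint predicate per bucket, assembled into a dict literal.
import Mathlib
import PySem

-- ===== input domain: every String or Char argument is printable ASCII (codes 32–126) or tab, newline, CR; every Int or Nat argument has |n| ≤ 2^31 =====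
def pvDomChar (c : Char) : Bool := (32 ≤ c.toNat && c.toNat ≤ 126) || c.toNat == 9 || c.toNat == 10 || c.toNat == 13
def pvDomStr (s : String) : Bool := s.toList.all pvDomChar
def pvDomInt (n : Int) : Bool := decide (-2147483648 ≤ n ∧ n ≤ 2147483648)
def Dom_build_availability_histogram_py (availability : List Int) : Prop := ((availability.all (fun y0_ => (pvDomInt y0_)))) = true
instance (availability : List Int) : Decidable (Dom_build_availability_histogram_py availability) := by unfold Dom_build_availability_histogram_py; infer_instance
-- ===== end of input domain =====

-- B replaces A's single loop over a mutated four-key dict by four independent counting passes, one per bucket (alternative decomposition, same O(n) cost).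


-- ===== PORT A =====
-- literal port: initialise the four-key dict, then one loop with the threshold cascade, each branch doing histogram[k] += 1
def build_availability_histogram_py (availability : List Int) : List (String × Int) :=
  let histogram : PySem.Dict String Int :=
    ((((PySem.Dict.empty.insert "missing" 0).insert "rare" 0).insert "common" 0).insert "abundant" 0)
  let histogram := availability.foldl (fun h count =>
    if count ≤ 0 then h.modify "missing" 0 (· + 1)
    else if count = 1 then h.modify "rare" 0 (· + 1)
    else if count ≤ 3 then h.modify "common" 0 (· + 1)
    else h.modify "abundant" 0 (· + 1)) histogram
  histogram.items

-- ===== PORT B =====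
-- literal port of Source B: each bucket is sum(1 for c in availability if <predicate>), a fold accumulating the sum
def build_availability_histogram_py_alt (availability : List Int) : List (String × Int) :=
  [("missing", availability.foldl (fun acc c => if c ≤ 0 then acc + 1 else acc) 0),
   ("rare", availability.foldl (fun acc c => if c = 1 then acc + 1 else acc) 0),
   ("common", availability.foldl (fun acc c => if 2 ≤ c ∧ c ≤ 3 then acc + 1 else acc) 0),
   ("abundant", availability.foldl (fun acc c => if 4 ≤ c then acc + 1 else acc) 0)]

-- ===== PRECONDITION & SPEC =====
def Spec_build_availability_histogram_py (availability : List Int) (out : List (String × Int)) : Prop := out = build_availability_histogram_py_alt availability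
instance (availability : List Int) (out : List (String × Int)) : Decidable (Spec_build_availability_histogram_py availability out) := by unfold Spec_build_availability_histogram_py; infer_instance

-- ===== CLAIM (what is proved, stated in full; the proofs are below) =====
def Claim_equal_build_availability_histogram_py : Prop := ∀ (availability : List Int), Dom_build_availability_histogram_py availability → Spec_build_availability_histogram_py availability (build_availability_histogram_py availability)

-- ===== LEMMAS AND PROOFS =====

-- A's loop, started on the four-key literal dict, yields the literal dict whose values grew by the four bucket counts
theorem loopA (l : List Int) (m r c a : Int) :
    l.foldl (fun h count =>
      if count ≤ 0 then h.modify "missing" 0 (· + 1)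
      else if count = 1 then h.modify "rare" 0 (· + 1)
      else if count ≤ 3 then h.modify "common" 0 (· + 1)
      else h.modify "abundant" 0 (· + 1))
      (PySem.Dict.mk [("missing", m), ("rare", r), ("common", c), ("abundant", a)])
    = PySem.Dict.mk
        [("missing", m + l.countP (fun x => decide (x ≤ 0))),
         ("rare", r + l.countP (fun x => decide (x = 1))),
         ("common", c + l.countP (fun x => decide (2 ≤ x ∧ x ≤ 3))),
         ("abundant", a + l.countP (fun x => decide (4 ≤ x)))] := by
  induction l generalizing m r c a with
  | nil => simp
  | cons x xs ih =>
    rw [List.foldl_cons]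
    by_cases h1 : x ≤ 0
    · rw [if_pos h1,
        show (PySem.Dict.mk [("missing", m), ("rare", r), ("common", c), ("abundant", a)]).modify "missing" 0 (· + 1)
          = PySem.Dict.mk [("missing", m + 1), ("rare", r), ("common", c), ("abundant", a)] from rfl, ih]
      simp [h1, show ¬(x = 1) by omega, show ¬(2 ≤ x ∧ x ≤ 3) by omega,
        show ¬(4 ≤ x) by omega]
      omega
    · by_cases h2 : x = 1
      · rw [if_neg h1, if_pos h2,
          show (PySem.Dict.mk [("missing", m), ("rare", r), ("common", c), ("abundant", a)]).modify "rare" 0 (· + 1)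
            = PySem.Dict.mk [("missing", m), ("rare", r + 1), ("common", c), ("abundant", a)] from rfl, ih]
        simp [h2]
        omega
      · by_cases h3 : x ≤ 3
        · rw [if_neg h1, if_neg h2, if_pos h3,
            show (PySem.Dict.mk [("missing", m), ("rare", r), ("common", c), ("abundant", a)]).modify "common" 0 (· + 1)
              = PySem.Dict.mk [("missing", m), ("rare", r), ("common", c + 1), ("abundant", a)] from rfl, ih]
          simp [h1, h2, show (2 ≤ x ∧ x ≤ 3) by omega, show ¬(4 ≤ x) by omega]
          omega
        · rw [if_neg h1, if_neg h2, if_neg h3,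
            show (PySem.Dict.mk [("missing", m), ("rare", r), ("common", c), ("abundant", a)]).modify "abundant" 0 (· + 1)
              = PySem.Dict.mk [("missing", m), ("rare", r), ("common", c), ("abundant", a + 1)] from rfl, ih]
          simp [h1, h2, show ¬(2 ≤ x ∧ x ≤ 3) by omega, show (4 ≤ x) by omega]
          omega

-- ===== VERDICT (by name: the statement is the Claim_ definition above) =====
theorem build_availability_histogram_py_spec : Claim_equal_build_availability_histogram_py := by
  intro availability _
  show (availability.foldl (fun h count =>
      if count ≤ 0 then h.modify "missing" 0 (· + 1)
      else if count = 1 then h.modify "rare" 0 (· + 1)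
      else if count ≤ 3 then h.modify "common" 0 (· + 1)
      else h.modify "abundant" 0 (· + 1))
      (PySem.Dict.mk [("missing", 0), ("rare", 0), ("common", 0), ("abundant", 0)])).items
    = build_availability_histogram_py_alt availability
  rw [loopA]
  unfold build_availability_histogram_py_alt
  have h1 := PySem.List.foldl_count_if (fun c : Int => decide (c ≤ 0)) availability 0
  have h2 := PySem.List.foldl_count_if (fun c : Int => decide (c = 1)) availability 0
  have h3 := PySem.List.foldl_count_if (fun c : Int => decide (2 ≤ c ∧ c ≤ 3)) availability 0
  have h4 := PySem.List.foldl_count_if (fun c : Int => decide (4 ≤ c)) availability 0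
  simp only [decide_eq_true_eq] at h1 h2 h3 h4
  rw [h1, h2, h3, h4]
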